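-- pv_equiv track=rewrite | github.com/wanweiwei07/pyhiro | caging/stance/stability.py | cavities
-- ===== SOURCE A (Python) =====
-- def cavities(onedcurve):
--     """
--     find the cavities of onedcurve
--     cavities are represented by triples (leftlocalmax, localmin, rightlocalmax)
--
--     :param onedcurve:
--     :return: [cavities0, cavities1, ...]
--
--     author: weiwei
--     date: 20170511
--     """
--
--     onedcavities = []
--     cavity = []
--     inc = False
--     dec = False
--     for i, point in enumerate(onedcurve):
--         if i >= 1:
--             prepoint = onedcurve[i-1]
--             if point[1] > prepoint[1] and dec:
--                 # local minima
--                 inc = True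
--                 dec = False
--                 if len(cavity) == 1:
--                     cavity.append(i-1)
--             elif point[1] > prepoint[1] and not inc:
--                 inc = True
--                 dec = False
--             if point[1] < prepoint[1] and inc:
--                 # local maxima
--                 inc = False
--                 dec = True
--                 if len(cavity) == 0:
--                     cavity.append(i-1)
--                 elif len(cavity) == 2:
--                     cavity.append(i-1)
--                     onedcavities.append(cavity)
--                     cavity = [i-1]
--                     inc = False
--                     dec = True
--             elif point[1] < prepoint[1] and not dec:
--                 inc = False
--                 dec = True
--     return onedcavities
-- ===== SOURCE B (Python) =====
-- def cavities(onedcurve):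
--     # Phase 1: one pass extracting extrema as (is_max, index); Phase 2: group
--     # them into overlapping (leftmax, min, rightmax) triples.
--     ext = []
--     state = 0  # 0 = no direction yet, 1 = increasing, -1 = decreasing
--     for k, ((_, py), (_, y)) in enumerate(zip(onedcurve, onedcurve[1:])):
--         if y > py:
--             if state == -1:
--                 ext.append((False, k))  # local minimum at index k
--             state = 1
--         elif y < py:
--             if state == 1:
--                 ext.append((True, k))   # local maximum at index k
--             state = -1
--     i = 0
--     while i < len(ext) and not ext[i][0]:
--         i += 1  # drop minima occurring before the first maximum
--     res = []
--     while i + 2 < len(ext):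
--         res.append([ext[i][1], ext[i + 1][1], ext[i + 2][1]])
--         i += 2  # triples overlap on the shared maximum
--     return res
-- ===== Notes on version B (the rewrite author's own statement) =====
-- stated objective: alternative
-- what changed: A's single interleaved state machine (inc/dec flags plus a partially built cavity list mutated in-loop) is replaced by a two-phase pipeline: one pass extracts the list of extrema as (is_max, index) pairs, then a second scan drops leading minima and groups the extrema into overlapping (leftmax, min, rightmax) triples.
import Mathlib
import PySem

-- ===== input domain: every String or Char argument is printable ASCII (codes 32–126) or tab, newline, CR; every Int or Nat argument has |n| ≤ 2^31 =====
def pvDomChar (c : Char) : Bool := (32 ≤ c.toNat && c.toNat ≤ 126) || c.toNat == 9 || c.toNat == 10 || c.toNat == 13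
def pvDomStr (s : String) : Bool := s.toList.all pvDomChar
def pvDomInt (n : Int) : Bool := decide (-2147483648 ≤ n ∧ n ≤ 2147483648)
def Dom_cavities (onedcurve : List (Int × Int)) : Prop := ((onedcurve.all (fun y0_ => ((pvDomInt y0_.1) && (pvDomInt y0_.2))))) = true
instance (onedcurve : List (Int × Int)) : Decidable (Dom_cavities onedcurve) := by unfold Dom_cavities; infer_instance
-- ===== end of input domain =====

-- B replaces A's one interleaved state machine by two phases — extract the list
-- of extrema, then group it into overlapping triples (objective: alternative
-- decomposition, same cost).

-- ===== PORT A =====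
-- the body of A's for-loop once `prepoint` is in hand (k = i-1, py = prepoint[1], y = point[1])
def cavStepA : (List (List Int) × List Int × Bool × Bool) → Int → Int → Int → (List (List Int) × List Int × Bool × Bool)
  | (acc, cavity, inc, dec), k, py, y =>
    let (cavity, inc, dec) :=
      if y > py ∧ dec = true then
        (if cavity.length = 1 then cavity ++ [k] else cavity, true, false)
      else if y > py ∧ inc = false then (cavity, true, false)
      else (cavity, inc, dec)
    if y < py ∧ inc = true then
      if cavity.length = 0 then (acc, [k], false, true)
      else if cavity.length = 2 then (acc ++ [cavity ++ [k]], [k], false, true)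
      else (acc, cavity, false, true)
    else if y < py ∧ dec = false then (acc, cavity, false, true)
    else (acc, cavity, inc, dec)

def cavities (onedcurve : List (Int × Int)) : List (List Int) :=
  ((PySem.List.enumerate onedcurve 0).foldl
    (fun s ip =>
      if ip.1 ≥ 1 then
        match PySem.List.pyGet? onedcurve (ip.1 - 1) with
        | some prepoint => cavStepA s (ip.1 - 1) prepoint.2 ip.2.2
        | none => s
      else s)
    ([], [], false, false)).1

-- ===== PORT B =====
-- phase 1 loop body: record an extremum on a strict direction change (k = pair index)
def extStep : (List (Bool × Int) × Int) → Int → Int → Int → (List (Bool × Int) × Int)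
  | (ext, st), k, py, y =>
    if y > py then (if st = -1 then ext ++ [(false, k)] else ext, 1)
    else if y < py then (if st = 1 then ext ++ [(true, k)] else ext, -1)
    else (ext, st)

-- phase 2 grouping loop: overlapping triples (leftmax, min, rightmax)
def group3 : List (Bool × Int) → List (List Int)
  | a :: b :: c :: rest => [a.2, b.2, c.2] :: group3 (c :: rest)
  | _ => []

def cavities_alt (onedcurve : List (Int × Int)) : List (List Int) :=
  let ext := ((PySem.List.enumerate (onedcurve.zip (PySem.List.slice onedcurve (some 1) none)) 0).foldl
    (fun s ip => extStep s ip.1 ip.2.1.2 ip.2.2.2) ([], 0)).1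
  group3 (ext.dropWhile (fun e => !e.1))

-- ===== PRECONDITION & SPEC =====
def Spec_cavities (onedcurve : List (Int × Int)) (out : List (List Int)) : Prop := out = cavities_alt onedcurve
instance (onedcurve : List (Int × Int)) (out : List (List Int)) : Decidable (Spec_cavities onedcurve out) := by unfold Spec_cavities; infer_instance

-- ===== CLAIM (what is proved, stated in full; the proofs are below) =====
def Claim_equal_cavities : Prop := ∀ (onedcurve : List (Int × Int)), Dom_cavities onedcurve → Spec_cavities onedcurve (cavities onedcurve)

-- ===== LEMMAS AND PROOFS =====

-- the part of the extrema list A's `cavity` variable holds (last 1 or 2 entries, overlap included)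
def leftover : List (Bool × Int) → List Int
  | [] => []
  | [a] => [a.2]
  | [a, b] => [a.2, b.2]
  | _ :: _ :: c :: rest => leftover (c :: rest)

theorem group3_append_odd : ∀ (l : List (Bool × Int)) (x : Bool × Int), l.length % 2 = 1 →
    group3 (l ++ [x]) = group3 l
  | [], _, h => by simp at h
  | [a], x, _ => by simp [group3]
  | [a, b], _, h => by simp at h
  | a :: b :: c :: rest, x, h => by
    have ih := group3_append_odd (c :: rest) x (by simp at h ⊢; omega)
    simp only [List.cons_append, group3] at ih ⊢
    rw [ih]

theorem leftover_append_odd : ∀ (l : List (Bool × Int)) (x : Bool × Int), l.length % 2 = 1 →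
    leftover (l ++ [x]) = leftover l ++ [x.2]
  | [], _, h => by simp at h
  | [a], x, _ => by simp [leftover]
  | [a, b], _, h => by simp at h
  | a :: b :: c :: rest, x, h => by
    have ih := leftover_append_odd (c :: rest) x (by simp at h ⊢; omega)
    simp only [List.cons_append, leftover] at ih ⊢
    exact ih

theorem group3_append_even : ∀ (l : List (Bool × Int)) (x : Bool × Int), l.length % 2 = 0 → l ≠ [] →
    group3 (l ++ [x]) = group3 l ++ [leftover l ++ [x.2]]
  | [], _, _, h => by simp at h
  | [a], _, h, _ => by simp at h
  | [a, b], x, _, _ => by simp [group3, leftover]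
  | a :: b :: c :: rest, x, h, _ => by
    have ih := group3_append_even (c :: rest) x (by simp at h ⊢; omega) (by simp)
    simp only [List.cons_append, group3, leftover] at ih ⊢
    rw [ih]

theorem leftover_append_even : ∀ (l : List (Bool × Int)) (x : Bool × Int), l.length % 2 = 0 →
    leftover (l ++ [x]) = [x.2]
  | [], x, _ => by simp [leftover]
  | [a], _, h => by simp at h
  | [a, b], x, _ => by simp [leftover]
  | a :: b :: c :: rest, x, h => by
    have ih := leftover_append_even (c :: rest) x (by simp at h ⊢; omega)
    simp only [List.cons_append, leftover] at ih ⊢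
    exact ih

theorem length_leftover_odd : ∀ (l : List (Bool × Int)), l.length % 2 = 1 → (leftover l).length = 1
  | [], h => by simp at h
  | [a], _ => by simp [leftover]
  | [a, b], h => by simp at h
  | a :: b :: c :: rest, h => by
    have ih := length_leftover_odd (c :: rest) (by simp at h ⊢; omega)
    simpa [leftover] using ih

theorem length_leftover_even : ∀ (l : List (Bool × Int)), l.length % 2 = 0 → l ≠ [] → (leftover l).length = 2
  | [], _, h => by simp at h
  | [a], h, _ => by simp at h
  | [a, b], _, _ => by simp [leftover]
  | a :: b :: c :: rest, h, _ => by
    have ih := length_leftover_even (c :: rest) (by simp at h ⊢; omega) (by simp)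
    simpa [leftover] using ih

-- the coupling invariant between A's loop state and B's phase-1 state
def CavInv (sa : List (List Int) × List Int × Bool × Bool) (sb : List (Bool × Int) × Int) : Prop :=
  (sb.2 = 0 ∨ sb.2 = 1 ∨ sb.2 = -1) ∧
  sa.2.2.1 = decide (sb.2 = 1) ∧ sa.2.2.2 = decide (sb.2 = -1) ∧
  sa.1 = group3 (sb.1.dropWhile (fun e => !e.1)) ∧
  sa.2.1 = leftover (sb.1.dropWhile (fun e => !e.1)) ∧
  (sb.2 = 0 → sb.1.dropWhile (fun e => !e.1) = []) ∧
  (sb.2 = 1 → (sb.1.dropWhile (fun e => !e.1)).length % 2 = 0) ∧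
  (sb.2 = -1 → sb.1.dropWhile (fun e => !e.1) = [] ∨ (sb.1.dropWhile (fun e => !e.1)).length % 2 = 1)

theorem inv_step (sa : List (List Int) × List Int × Bool × Bool) (sb : List (Bool × Int) × Int)
    (k py y : Int) (h : CavInv sa sb) : CavInv (cavStepA sa k py y) (extStep sb k py y) := by
  obtain ⟨acc, cav, inc, dec⟩ := sa
  obtain ⟨ext, st⟩ := sb
  obtain ⟨hst, hinc, hdec, hacc, hcav, h0, h1, hm1⟩ := h
  simp only at hst hinc hdec hacc hcav h0 h1 hm1
  have hp_min : (List.dropWhile (fun e : Bool × Int => !e.1) [((false : Bool), k)]) = [] := by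
    simp [List.dropWhile]
  have hp_max : (List.dropWhile (fun e : Bool × Int => !e.1) [((true : Bool), k)]) = [((true : Bool), k)] := by
    simp [List.dropWhile]
  by_cases hgt : y > py
  · have hnlt : ¬ (y < py) := by omega
    rcases hst with h|h|h <;> subst h <;> norm_num at hinc hdec <;> subst hinc <;> subst hdec
    · -- st = 0 : no extremum yet; direction becomes increasing on both sides
      have hE := h0 rfl
      simp only [cavStepA, extStep, hgt, hnlt]
      norm_num
      unfold CavInv
      refine ⟨by norm_num, by norm_num, by norm_num, hacc, hcav, by norm_num, ?_, by norm_num⟩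
      intro _; simp [hE]
    · -- st = 1 : still increasing, nothing changes
      simp only [cavStepA, extStep, hgt, hnlt]
      norm_num
      unfold CavInv
      exact ⟨by norm_num, by norm_num, by norm_num, hacc, hcav, by norm_num, fun _ => h1 rfl, by norm_num⟩
    · -- st = -1 : a local minimum at k (recorded only when a left max exists)
      simp only [cavStepA, extStep, hgt, hnlt]
      norm_num
      rcases hm1 rfl with hE | hodd
      · -- no extremum kept yet: A drops the minimum, B's stays in the dropped prefix
        have hcav0 : cav.length ≠ 1 := by rw [hcav, hE]; simp [leftover]
        have hE' : List.dropWhile (fun e : Bool × Int => !e.1) (ext ++ [(false, k)]) = [] := by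
          rw [List.dropWhile_append, hE]; simpa using hp_min
        simp only [if_neg hcav0]
        unfold CavInv
        refine ⟨by norm_num, by norm_num, by norm_num, ?_, ?_, by norm_num, ?_, by norm_num⟩
        · rw [hE']; rw [hE] at hacc; exact hacc
        · rw [hE']; rw [hE] at hcav; exact hcav
        · intro _; rw [hE']; rfl
      · -- a left max is pending (odd extrema list): both record the minimum
        have hEne : List.dropWhile (fun e : Bool × Int => !e.1) ext ≠ [] := by
          intro hc; rw [hc] at hodd; simp at hodd
        have hcav1 : cav.length = 1 := by rw [hcav]; exact length_leftover_odd _ hodd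
        rcases List.length_eq_one_iff.mp hcav1 with ⟨m, hm⟩
        subst hm
        have hE' : List.dropWhile (fun e : Bool × Int => !e.1) (ext ++ [(false, k)]) =
            List.dropWhile (fun e : Bool × Int => !e.1) ext ++ [(false, k)] := by
          rw [List.dropWhile_append, if_neg (by simpa using hEne)]
        norm_num
        unfold CavInv
        refine ⟨by norm_num, by norm_num, by norm_num, ?_, ?_, by norm_num, ?_, by norm_num⟩
        · rw [hE', group3_append_odd _ _ hodd]; exact hacc
        · simp [hE', leftover_append_odd _ _ hodd, ← hcav]
        · intro _; rw [hE']; simp; omega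
  · by_cases hlt : y < py
    · rcases hst with h|h|h <;> subst h <;> norm_num at hinc hdec <;> subst hinc <;> subst hdec
      · -- st = 0 : direction becomes decreasing on both sides, nothing recorded
        have hE := h0 rfl
        simp only [cavStepA, extStep, hgt, hlt]
        norm_num
        unfold CavInv
        refine ⟨by norm_num, by norm_num, by norm_num, hacc, hcav, by norm_num, by norm_num, ?_⟩
        intro _; exact Or.inl hE
      · -- st = 1 : a local maximum at k
        simp only [cavStepA, extStep, hgt, hlt]
        norm_num
        have hEeven := h1 rfl
        by_cases hE : List.dropWhile (fun e : Bool × Int => !e.1) ext = []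
        · -- first maximum: A starts a cavity, B appends the first kept extremum
          have hcavnil : cav = [] := by rw [hcav, hE]; rfl
          subst hcavnil
          have hE' : List.dropWhile (fun e : Bool × Int => !e.1) (ext ++ [(true, k)]) =
              [((true : Bool), k)] := by
            rw [List.dropWhile_append, hE]; simpa using hp_max
          norm_num
          unfold CavInv
          refine ⟨by norm_num, by norm_num, by norm_num, ?_, ?_, by norm_num, by norm_num, ?_⟩
          · rw [hE', hacc, hE]; rfl
          · rw [hE']; rfl
          · intro _; rw [hE']; right; rfl
        · -- a full cavity closes: A emits it and restarts, B appends the shared max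
          have hcav2 : cav.length = 2 := by rw [hcav]; exact length_leftover_even _ hEeven hE
          obtain ⟨a, b, hab⟩ := List.length_eq_two.mp hcav2
          subst hab
          have hE' : List.dropWhile (fun e : Bool × Int => !e.1) (ext ++ [(true, k)]) =
              List.dropWhile (fun e : Bool × Int => !e.1) ext ++ [(true, k)] := by
            rw [List.dropWhile_append, if_neg (by simpa using hE)]
          norm_num
          rw [if_neg (show ¬([a, b] = ([] : List Int)) by simp)]
          unfold CavInv
          refine ⟨by norm_num, by norm_num, by norm_num, ?_, ?_, by norm_num, by norm_num, ?_⟩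
          · simp [hE', group3_append_even _ _ hEeven hE, ← hacc, ← hcav]
          · simp [hE', leftover_append_even _ _ hEeven]
          · intro _; rw [hE']; right; simp; omega
      · -- st = -1 : still decreasing, nothing changes
        simp only [cavStepA, extStep, hgt, hlt]
        norm_num
        unfold CavInv
        exact ⟨by norm_num, by norm_num, by norm_num, hacc, hcav, by norm_num, by norm_num,
          fun _ => hm1 rfl⟩
    · -- plateau: y = py, both states untouched
      have hy : ¬ (y > py) := hgt
      simp only [cavStepA, extStep, hy, hlt]
      norm_num
      exact ⟨hst, hinc, hdec, hacc, hcav, h0, h1, hm1⟩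

theorem inv_fold (l : List (Int × ((Int × Int) × (Int × Int)))) :
    ∀ sa sb, CavInv sa sb →
    CavInv (l.foldl (fun s ip => cavStepA s ip.1 ip.2.1.2 ip.2.2.2) sa)
        (l.foldl (fun s ip => extStep s ip.1 ip.2.1.2 ip.2.2.2) sb) := by
  induction l with
  | nil => intro sa sb h; simpa using h
  | cons x xs ih =>
    intro sa sb h
    exact ih _ _ (inv_step sa sb x.1 x.2.1.2 x.2.2.2 h)

theorem bridgeA : ∀ (rest pre : List (Int × Int)) (prev : Int × Int)
    (s : List (List Int) × List Int × Bool × Bool),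
    (PySem.List.enumerate rest ((pre.length : Int) + 1)).foldl
      (fun s ip =>
        if ip.1 ≥ 1 then
          match PySem.List.pyGet? (pre ++ prev :: rest) (ip.1 - 1) with
          | some prepoint => cavStepA s (ip.1 - 1) prepoint.2 ip.2.2
          | none => s
        else s) s
    = (PySem.List.enumerate ((prev :: rest).zip rest) ((pre.length : Int))).foldl
        (fun s ip => cavStepA s ip.1 ip.2.1.2 ip.2.2.2) s := by
  intro rest
  induction rest with
  | nil => intro pre prev s; simp [PySem.List.enumerate]
  | cons b rest' ih =>
    intro pre prev s
    rw [PySem.List.enumerate_cons, List.zip_cons_cons, PySem.List.enumerate_cons]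
    simp only [List.foldl_cons]
    have hge : ((pre.length : Int) + 1) ≥ 1 := by omega
    rw [if_pos hge]
    have hidx : (pre.length : Int) + 1 - 1 = (pre.length : Int) := by ring
    rw [hidx, PySem.List.pyGet?_append_length]
    have hre : pre ++ prev :: b :: rest' = (pre ++ [prev]) ++ b :: rest' := by simp
    have hlen : ((pre ++ [prev]).length : Int) = (pre.length : Int) + 1 := by simp
    have := ih (pre ++ [prev]) b (cavStepA s (pre.length : Int) prev.2 b.2)
    rw [hlen] at this
    rw [hre]
    exact this

theorem cavities_eq_alt (c : List (Int × Int)) : cavities c = cavities_alt c := by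
  have hinv0 : CavInv ([], [], false, false) ([], 0) := by
    constructor
    · left; rfl
    · refine ⟨rfl, rfl, rfl, rfl, fun _ => rfl, fun h => by simp, fun h => by simp at h⟩
  cases c with
  | nil => rfl
  | cons prev rest =>
    unfold cavities cavities_alt
    rw [PySem.List.enumerate_cons, List.foldl_cons]
    have hz : PySem.List.slice (prev :: rest) (some 1) none = rest := by
      simp [PySem.List.slice_from]
    rw [hz]
    have h0 : (if (0 : Int) ≥ 1 then
        match PySem.List.pyGet? (prev :: rest) ((0 : Int) - 1) with
        | some prepoint => cavStepA (([], [], false, false) : List (List Int) × List Int × Bool × Bool) ((0:Int) - 1) prepoint.2 prev.2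
        | none => (([], [], false, false) : List (List Int) × List Int × Bool × Bool)
      else (([], [], false, false) : List (List Int) × List Int × Bool × Bool)) = ([], [], false, false) := by
      norm_num
    have hb := bridgeA rest [] prev ([], [], false, false)
    simp only [List.length_nil, Nat.cast_zero, zero_add, List.nil_append] at hb
    have hfold := inv_fold (PySem.List.enumerate ((prev :: rest).zip rest) 0)
      ([], [], false, false) ([], 0) hinv0
    obtain ⟨_, _, _, hacc, _, _, _, _⟩ := hfold
    simp only [h0, zero_add]
    rw [hb]
    exact hacc

-- ===== VERDICT (by name: the statement is the Claim_ definition above) =====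
theorem cavities_spec : Claim_equal_cavities := by
  intro onedcurve _
  unfold Spec_cavities
  exact cavities_eq_alt onedcurve
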